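-- pv_equiv track=rewrite | github.com/gakukuriu/ManyToOneSAT | manyToOneSat.py | internsTruncation
-- ===== SOURCE A (Python) =====
-- from itertools import permutations
--
-- n = 2
--
-- def internsPreferInPref(h1, h2, ip):
--     preflists = list(permutations(range(n+1)))
--     ip_list = preflists[ip]
--     return(ip_list.index(h1) < ip_list.index(h2))
--
-- def internsRankInPref(h, ip):
--     preflists = list(permutations(range(n+1)))
--     ip_list = preflists[ip]
--     return(ip_list.index(h))
--
-- def internsTruncation(ip1, ip2):  # check whether an intern's preference ip1 is a truncation preference of ip2
--     for h1 in range(1, n+1):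
--         for h2 in range(h1+1, n+1):
--             if not ((internsPreferInPref(h1, h2, ip1) & internsPreferInPref(h1, h2, ip2)) | (internsPreferInPref(h2, h1, ip1) & internsPreferInPref(h2, h1, ip2))):
--                 return False
--     if (internsRankInPref(0, ip1) < internsRankInPref(0, ip2)):
--         return True
--     return False
-- ===== SOURCE B (Python) =====
-- from itertools import permutations
--
-- n = 2
--
-- def internsTruncation(ip1, ip2):
--     preflists = list(permutations(range(n + 1)))
--     p1 = preflists[ip1]
--     p2 = preflists[ip2]
--     if [x for x in p1 if x != 0] != [x for x in p2 if x != 0]: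
--         return False
--     return p1.index(0) < p2.index(0)
-- ===== Notes on version B (the rewrite author's own statement) =====
-- stated objective: simpler
-- what changed: B fetches both permutations once and decides truncation in one pass by comparing the 0-filtered hospital orderings and the positions of 0, instead of A's nested all-pairs loop that rebuilds the permutation list and re-derives indices inside two helper functions for every hospital pair.
import Mathlib
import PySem

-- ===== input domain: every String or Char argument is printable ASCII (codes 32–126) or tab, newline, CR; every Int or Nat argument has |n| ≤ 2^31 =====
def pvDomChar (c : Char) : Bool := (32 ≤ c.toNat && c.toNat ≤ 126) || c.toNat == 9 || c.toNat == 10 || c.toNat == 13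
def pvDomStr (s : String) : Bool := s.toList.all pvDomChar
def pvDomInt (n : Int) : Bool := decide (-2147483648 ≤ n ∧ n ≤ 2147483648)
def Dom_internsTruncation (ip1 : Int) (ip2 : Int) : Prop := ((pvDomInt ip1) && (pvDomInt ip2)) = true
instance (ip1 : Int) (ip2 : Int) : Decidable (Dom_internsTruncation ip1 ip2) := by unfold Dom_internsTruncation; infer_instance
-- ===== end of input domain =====

-- B replaces A's nested all-pairs agreement loop (with helpers rebuilding the permutation
-- list each call) by one filter-and-compare of the two preference tuples (objective: simpler).

-- ===== PORT A =====
-- preflists = list(permutations(range(n+1))), n = 2 (module constant)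
def pvPreflistsA : List (List Int) :=
  PySem.List.permutations [(0 : Int), 1, 2] 3

-- returns none where the Python helper raises (IndexError on preflists[ip] or ValueError on .index)
def internsPreferInPref (h1 : Int) (h2 : Int) (ip : Int) : Option Bool :=
  match PySem.List.pyGet? pvPreflistsA ip with
  | none => none
  | some l =>
    match PySem.List.index? l h1, PySem.List.index? l h2 with
    | some i, some j => some (decide (i < j))
    | _, _ => none

def internsRankInPref (h : Int) (ip : Int) : Option Nat :=
  match PySem.List.pyGet? pvPreflistsA ip with
  | none => none
  | some l => PySem.List.index? l h

-- the two nested for-loops with early 'return False'; Python's '&'/'|' on bools = &&/||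
def internsTruncation (ip1 : Int) (ip2 : Int) : Bool :=
  if (PySem.List.pyRange 1 (2 + 1) 1).all (fun h1 =>
       (PySem.List.pyRange (h1 + 1) (2 + 1) 1).all (fun h2 =>
         (((internsPreferInPref h1 h2 ip1).getD false &&
           (internsPreferInPref h1 h2 ip2).getD false) ||
          ((internsPreferInPref h2 h1 ip1).getD false &&
           (internsPreferInPref h2 h1 ip2).getD false))))
  then
    if (internsRankInPref 0 ip1).getD 0 < (internsRankInPref 0 ip2).getD 0 then true else false
  else false

-- ===== PORT B =====
def pvPreflistsB : List (List Int) :=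
  PySem.List.permutations [(0 : Int), 1, 2] 3

def internsTruncation_alt (ip1 : Int) (ip2 : Int) : Bool :=
  match PySem.List.pyGet? pvPreflistsB ip1 with
  | none => false
  | some p1 =>
    match PySem.List.pyGet? pvPreflistsB ip2 with
    | none => false
    | some p2 =>
      if p1.filter (fun x => x ≠ 0) ≠ p2.filter (fun x => x ≠ 0) then false
      else
        match PySem.List.index? p1 0, PySem.List.index? p2 0 with
        | some i, some j => decide (i < j)
        | _, _ => false

-- ===== PRECONDITION & SPEC =====
-- Python A raises IndexError unless both indices are valid for the 6-element permutation list.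
def Pre_internsTruncation (ip1 : Int) (ip2 : Int) : Prop :=
  (-6 ≤ ip1 ∧ ip1 ≤ 5) ∧ (-6 ≤ ip2 ∧ ip2 ≤ 5)
instance (ip1 : Int) (ip2 : Int) : Decidable (Pre_internsTruncation ip1 ip2) := by unfold Pre_internsTruncation; infer_instance
def pvWitness_internsTruncation : Int × Int := (2, 3)

def Spec_internsTruncation (ip1 : Int) (ip2 : Int) (out : Bool) : Prop := out = internsTruncation_alt ip1 ip2
instance (ip1 : Int) (ip2 : Int) (out : Bool) : Decidable (Spec_internsTruncation ip1 ip2 out) := by unfold Spec_internsTruncation; infer_instance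

-- ===== CLAIM (what is proved, stated in full; the proofs are below) =====
def Claim_equal_internsTruncation : Prop := ∀ (ip1 : Int) (ip2 : Int), Dom_internsTruncation ip1 ip2 → Pre_internsTruncation ip1 ip2 → Spec_internsTruncation ip1 ip2 (internsTruncation ip1 ip2)

-- ===== LEMMAS AND PROOFS =====
-- the 144 valid index pairs, checked by the kernel
theorem pvKey : ∀ (i j : Fin 12),
    internsTruncation ((i : Int) - 6) ((j : Int) - 6) =
    internsTruncation_alt ((i : Int) - 6) ((j : Int) - 6) := by decide

-- ===== VERDICT (by name: the statement is the Claim_ definition above) =====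
theorem internsTruncation_spec : Claim_equal_internsTruncation := by
  intro ip1 ip2 _ hpre
  obtain ⟨⟨h1a, h1b⟩, ⟨h2a, h2b⟩⟩ := hpre
  unfold Spec_internsTruncation
  have e1 : ip1 = ((⟨(ip1 + 6).toNat, by omega⟩ : Fin 12) : Int) - 6 := by simp; omega
  have e2 : ip2 = ((⟨(ip2 + 6).toNat, by omega⟩ : Fin 12) : Int) - 6 := by simp; omega
  rw [e1, e2]
  exact pvKey _ _
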